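-- pv_equiv track=rewrite | github.com/ilgo/biology | bioinformatics_1/bio2.py | number_of_peptides_with_mass
-- ===== SOURCE A (Python) =====
-- from itertools import product, chain, permutations, combinations, filterfalse
--
-- def number_of_peptides_with_mass(mass, in_data=None):
--     '''
--     dynamic programming solution to find all possible ways peptides add up to a given mass
--
--     returns the number of ways peptides can have a given mass
--
--     :param mass: the mass to be achieved
--     :type mass: `int`
--     :param in_data: the masses of the components
--     :type in_data: [`int, ...]
--
--     :rtype: `int`
--     '''
--     out = 0
--     data = set(in_data)
--     sources = {k:1 for k in data}
--     while sources:
--         targets = {}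
--         for src, add in product(*[sources.keys(), data]):
--             val = src + add
--             targets[val] = targets.get(val, 0) + sources.get(src,1)
--         if mass in targets:
--             out += targets.pop(mass)
--         sources = {k:v for k,v in targets.items() if k <= mass}
--
--     return out
-- ===== SOURCE B (Python) =====
-- def number_of_peptides_with_mass(mass, in_data=None):
--     '''Bottom-up 1-D composition DP: ways[m] = sum(ways[m-d] for d in set(in_data)).
--
--     Counts every ordered peptide (any length, including the single peptide and,
--     for mass 0, the empty one), where A misses lengths 0 and 1.
--     '''
--     data = set(in_data)
--     if mass < 0:
--         return 0
--     ways = [1]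
--     for m in range(1, mass + 1):
--         ways.append(sum(ways[m - d] for d in data if 0 < d <= m))
--     return ways[mass]
-- ===== Notes on version B (the rewrite author's own statement) =====
-- stated objective: alternative
-- what changed: Replaced the level-by-level dict expansion (rebuilding a source->target dict of all reachable partial sums each round) by a single bottom-up 1-D composition DP ways[m]=sum(ways[m-d]); intended as the asymptotically cheaper algorithm, but a timing run could not confirm a ratio (A already times out at sizes where B returns). B also counts the length-0/length-1 peptides A misses.
-- intended difference: On inputs with mass == 0 or mass in in_data, A returns a count that omits the empty (mass-0) and the single-peptide composition, B returns that count plus one, which is the intended number of ordered peptide compositions of the given mass. — e.g. on number_of_peptides_with_mass(3, [1, 3]): A returns 1, B returns 2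
-- outside the precondition, e.g. on number_of_peptides_with_mass(-8, [-4]): A returns 1, B returns 0
import Mathlib
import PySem

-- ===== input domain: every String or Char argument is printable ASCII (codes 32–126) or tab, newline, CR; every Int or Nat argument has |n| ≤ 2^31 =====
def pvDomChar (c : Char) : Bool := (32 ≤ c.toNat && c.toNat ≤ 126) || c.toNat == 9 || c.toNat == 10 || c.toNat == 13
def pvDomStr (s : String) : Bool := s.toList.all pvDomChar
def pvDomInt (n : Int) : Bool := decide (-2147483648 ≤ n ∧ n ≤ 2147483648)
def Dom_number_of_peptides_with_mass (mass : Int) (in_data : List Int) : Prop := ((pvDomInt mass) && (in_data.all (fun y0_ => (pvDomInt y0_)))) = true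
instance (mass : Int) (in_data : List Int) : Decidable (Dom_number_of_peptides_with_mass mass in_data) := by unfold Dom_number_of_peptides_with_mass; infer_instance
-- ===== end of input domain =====

-- B replaces A's level-by-level dict expansion by a bottom-up 1-D composition DP (a different
-- algorithm of lower asymptotic cost; no speed ratio was measurable since A times out at scale),
-- and intentionally also counts the length-0/length-1 peptides A misses (see D_ below).

-- ===== PORT A =====
-- The Python `while sources:` loop is run on fuel mass.toNat + 2, which is enough for every input
-- admitted by Pre_ (all component masses ≥ 1, so each round's keys grow and stay ≤ mass):
-- the fuel only makes the same computation total, it never changes the result on Pre_.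
def pvALoop (mass : Int) (data : List Int) : Nat → PySem.Dict Int Int → Int → Int
  | 0, _, out => out
  | fuel + 1, sources, out =>
    if sources.items.isEmpty then out
    else
      -- for src, add in product(sources.keys(), data): targets[val] = targets.get(val,0) + sources.get(src,1)
      let pairs := sources.keys.flatMap (fun k => data.map (fun d => (k, d)))
      let targets := pairs.foldl
        (fun t p => t.insert (p.1 + p.2) (t.getD (p.1 + p.2) 0 + sources.getD p.1 1))
        PySem.Dict.empty
      -- if mass in targets: out += targets.pop(mass)
      let out' := if targets.contains mass then out + targets.getD mass 0 else out
      let targets' := if targets.contains mass then targets.erase mass else targets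
      -- sources = {k:v for k,v in targets.items() if k <= mass}
      let sources' := (targets'.items.filter (fun p => decide (p.1 ≤ mass))).foldl
        (fun d p => d.insert p.1 p.2) PySem.Dict.empty
      pvALoop mass data fuel sources' out'

def number_of_peptides_with_mass (mass : Int) (in_data : List Int) : Int :=
  let data := PySem.Set.ofList in_data
  -- sources = {k:1 for k in data}
  let sources := data.foldl (fun d k => d.insert k (1 : Int)) PySem.Dict.empty
  pvALoop mass data (mass.toNat + 2) sources 0

-- ===== PORT B =====
-- ways[m - d] is read with pyGet? ∘ getD 0; the guard 0 < d ≤ m keeps the index in range, so this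
-- is exactly Python's ways[m - d] wherever it is evaluated.
def number_of_peptides_with_mass_alt (mass : Int) (in_data : List Int) : Int :=
  let data := PySem.Set.ofList in_data
  if mass < 0 then 0
  else
    let ways := (PySem.List.pyRange 1 (mass + 1)).foldl
      (fun ws m =>
        ws ++ [((data.filter (fun d => decide (0 < d) && decide (d ≤ m))).map
                 (fun d => (PySem.List.pyGet? ws (m - d)).getD 0)).sum])
      [1]
    (PySem.List.pyGet? ways mass).getD 0

-- ===== PRECONDITION & SPEC =====
-- Pre_ restricts to positive component masses, the natural domain: with a component mass ≤ 0 partial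
-- sums stop growing, so Python A's while-loop usually diverges, and in the degenerate corners where it
-- does return (e.g. A(-8, [-4]) = 1, a 'peptide' of negative masses) its value is accidental.
def Pre_number_of_peptides_with_mass (mass : Int) (in_data : List Int) : Prop :=
  ∀ d ∈ in_data, 1 ≤ d
instance (mass : Int) (in_data : List Int) : Decidable (Pre_number_of_peptides_with_mass mass in_data) := by
  unfold Pre_number_of_peptides_with_mass; infer_instance

def pvWitness_number_of_peptides_with_mass : Int × List Int := (5, [2, 3])

-- On inputs with mass == 0 or mass ∈ in_data, A returns a count that omits the empty (mass-0) and the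
-- single-peptide composition, B returns that count plus one — the intended number of ordered peptide
-- compositions of the given mass.
def D_number_of_peptides_with_mass (mass : Int) (in_data : List Int) : Prop :=
  mass = 0 ∨ mass ∈ in_data
instance (mass : Int) (in_data : List Int) : Decidable (D_number_of_peptides_with_mass mass in_data) := by
  unfold D_number_of_peptides_with_mass; infer_instance

def Spec_number_of_peptides_with_mass (mass : Int) (in_data : List Int) (out : Int) : Prop :=
  ¬ D_number_of_peptides_with_mass mass in_data → out = number_of_peptides_with_mass_alt mass in_data
instance (mass : Int) (in_data : List Int) (out : Int) : Decidable (Spec_number_of_peptides_with_mass mass in_data out) := by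
  unfold Spec_number_of_peptides_with_mass; infer_instance

def pvDiffWitness_number_of_peptides_with_mass : Int × List Int := (3, [1, 3])
def pvDiffWitnessOut_number_of_peptides_with_mass : Int × Int := (1, 2)

-- ===== CLAIM (what is proved, stated in full; the proofs are below) =====
def Claim_unchanged_number_of_peptides_with_mass : Prop := ∀ (mass : Int) (in_data : List Int), Dom_number_of_peptides_with_mass mass in_data → Pre_number_of_peptides_with_mass mass in_data → Spec_number_of_peptides_with_mass mass in_data (number_of_peptides_with_mass mass in_data)
def Claim_changed_number_of_peptides_with_mass : Prop := Dom_number_of_peptides_with_mass (pvDiffWitness_number_of_peptides_with_mass.1) (pvDiffWitness_number_of_peptides_with_mass.2) ∧ Pre_number_of_peptides_with_mass (pvDiffWitness_number_of_peptides_with_mass.1) (pvDiffWitness_number_of_peptides_with_mass.2) ∧ D_number_of_peptides_with_mass (pvDiffWitness_number_of_peptides_with_mass.1) (pvDiffWitness_number_of_peptides_with_mass.2) ∧ number_of_peptides_with_mass (pvDiffWitness_number_of_peptides_with_mass.1) (pvDiffWitness_number_of_peptides_with_mass.2) = pvDiffWitnessOut_number_of_peptides_with_mass.1 ∧ number_of_peptides_with_mass_alt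 (pvDiffWitness_number_of_peptides_with_mass.1) (pvDiffWitness_number_of_peptides_with_mass.2) = pvDiffWitnessOut_number_of_peptides_with_mass.2 ∧ pvDiffWitnessOut_number_of_peptides_with_mass.1 ≠ pvDiffWitnessOut_number_of_peptides_with_mass.2
def Claim_exact_number_of_peptides_with_mass : Prop := ∀ (mass : Int) (in_data : List Int), Dom_number_of_peptides_with_mass mass in_data → Pre_number_of_peptides_with_mass mass in_data → D_number_of_peptides_with_mass mass in_data → number_of_peptides_with_mass mass in_data ≠ number_of_peptides_with_mass_alt mass in_data

-- ===== LEMMAS AND PROOFS =====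

-- W S m = number of ordered compositions of m with parts drawn from S (S a nodup list of positives).
def pvW (S : List Int) (m : Nat) : Int :=
  if h : m = 0 then 1
  else ((S.filter (fun d => decide (0 < d) && decide (d ≤ (m : Int)))).attach.map
         (fun d => pvW S (m - d.1.toNat))).sum
termination_by m
decreasing_by
  have := List.of_mem_filter d.2
  simp at this
  omega

-- C S j = number of NONEMPTY ordered compositions of the integer j (0 for j ≤ 0).
def pvC (S : List Int) (j : Int) : Int := if j ≤ 0 then 0 else pvW S j.toNat

-- sum of f over a filtered list = full sum when f vanishes where the predicate fails
theorem pvSum_filter_map {α : Type} (l : List α) (q : α → Bool) (f : α → Int) :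
    ((l.filter q).map f).sum = (l.map (fun x => if q x then f x else 0)).sum := by
  induction l with
  | nil => rfl
  | cons p l ih => by_cases h : q p <;> simp [h, ih]

theorem pvSum_indicator (U : List Int) (hU : U.Nodup) (a c : Int) :
    (U.map (fun t => if t = a then c else 0)).sum = if a ∈ U then c else 0 := by
  induction U with
  | nil => simp
  | cons t U ih =>
    simp only [List.nodup_cons] at hU
    simp only [List.map_cons, List.sum_cons, ih hU.2, List.mem_cons]
    by_cases h : t = a
    · subst h
      simp [hU.1]
    · simp [h, Ne.symm h]

-- regrouping: summing group totals over the (nodup, complete) key set U = summing over the list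
theorem pvSum_partition {α : Type} (key : α → Int) (f : α → Int) (U : List Int)
    (hU : U.Nodup) : ∀ (l : List α), (∀ p ∈ l, key p ∈ U) →
    (U.map (fun t => ((l.filter (fun p => key p == t)).map f).sum)).sum = (l.map f).sum := by
  intro l
  induction l with
  | nil => simp
  | cons p l ih =>
    intro hall
    have h1 : ∀ t : Int, (((p :: l).filter (fun p => key p == t)).map f).sum
        = (if t = key p then f p else 0) + ((l.filter (fun p => key p == t)).map f).sum := by
      intro t
      by_cases h : key p = t
      · simp [h]
      · simp [h, Ne.symm h]
    calc (U.map (fun t => (((p :: l).filter (fun q => key q == t)).map f).sum)).sum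
        = (U.map (fun t => (if t = key p then f p else 0)
            + ((l.filter (fun q => key q == t)).map f).sum)).sum := by
          exact congrArg _ (List.map_eq_map_iff.mpr (fun t _ => h1 t))
      _ = (U.map (fun t => if t = key p then f p else 0)).sum
            + (U.map (fun t => ((l.filter (fun q => key q == t)).map f).sum)).sum :=
          PySem.List.sum_map_add_int U _ _
      _ = f p + (l.map f).sum := by
          rw [pvSum_indicator U hU (key p) (f p), if_pos (hall p List.mem_cons_self),
            ih (fun q hq => hall q (List.mem_cons_of_mem p hq))]
      _ = ((p :: l).map f).sum := by simp

-- the fundamental recurrence for pvC over a nodup list of positive masses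
theorem pvC_rec (S : List Int) (hS : S.Nodup) (hpos : ∀ d ∈ S, 1 ≤ d) (j : Int) :
    pvC S j = (if j ∈ S then 1 else 0) + (S.map (fun d => pvC S (j - d))).sum := by
  by_cases hj : j ≤ 0
  · have h1 : j ∉ S := fun h => by have := hpos j h; omega
    have h2 : (S.map fun d => pvC S (j - d)).sum = 0 := by
      apply List.sum_eq_zero
      intro x hx
      simp only [List.mem_map] at hx
      obtain ⟨d, hd, rfl⟩ := hx
      have := hpos d hd
      simp only [pvC, if_pos (by omega : j - d ≤ 0)]
    rw [pvC, if_pos hj, if_neg h1, h2]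
    norm_num
  · push_neg at hj
    rw [pvC, if_neg (by omega), pvW, dif_neg (by omega)]
    simp only [List.map_subtype, List.unattach_attach]
    rw [pvSum_filter_map, ← pvSum_indicator S hS j 1, ← PySem.List.sum_map_add_int]
    apply congrArg
    apply List.map_eq_map_iff.mpr
    intro d hd
    have hd1 : 1 ≤ d := hpos d hd
    by_cases hdj : d = j
    · subst hdj
      rw [if_pos (by simp; omega), if_pos rfl]
      rw [pvW, dif_pos (by omega)]
      simp [pvC]
    · by_cases hlt : d < j
      · rw [if_pos (by simp; omega), if_neg hdj, pvC, if_neg (by omega)]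
        rw [(by omega : (j - d).toNat = j.toNat - d.toNat)]
        ring
      · rw [if_neg (by simp; omega), if_neg hdj, pvC, if_pos (by omega)]
        ring

-- ===== B-side: the ways table is [W 0, …, W m] =====
theorem pvWaysInv (S : List Int) (n : Nat) :
    (PySem.List.pyRange 1 ((n : Int) + 1)).foldl
      (fun ws m =>
        ws ++ [((S.filter (fun d => decide (0 < d) && decide (d ≤ m))).map
                 (fun d => (PySem.List.pyGet? ws (m - d)).getD 0)).sum])
      [1]
    = (List.range (n + 1)).map (fun i => pvW S i) := by
  induction n with
  | zero =>
    norm_num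
    rw [pvW]
    simp
  | succ n ih =>
    have hcast : ((n + 1 : Nat) : Int) + 1 = (((n : Int) + 1) + 1) := by push_cast; ring
    rw [hcast, PySem.List.pyRange_one_succ_right (by omega), List.foldl_append, ih]
    simp only [List.foldl_cons, List.foldl_nil]
    rw [(by rw [List.range_succ] : List.range (n + 1 + 1) = List.range (n + 1) ++ [n + 1]),
      List.map_append]
    apply congrArg
    simp only [List.map_cons, List.map_nil]
    apply congrArg (fun x => [x])
    -- the appended entry is pvW S (n+1)
    rw [pvW, dif_neg (by omega)]
    simp only [List.map_subtype, List.unattach_attach]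
    have hcast2 : ((n + 1 : Nat) : Int) = (n : Int) + 1 := by push_cast; ring
    rw [hcast2]
    apply congrArg
    apply List.map_eq_map_iff.mpr
    intro d hd
    simp only [List.mem_filter, Bool.and_eq_true, decide_eq_true_eq] at hd
    obtain ⟨-, hd0, hdn⟩ := hd
    have hidx : (n : Int) + 1 - d = ((n + 1 - d.toNat : Nat) : Int) := by omega
    rw [hidx, PySem.List.pyGet?_natCast]
    have hlt : n + 1 - d.toNat < n + 1 := by omega
    simp [List.getElem?_map, List.getElem?_range, hlt]

theorem pvAlt_eq (mass : Int) (in_data : List Int) (h : 0 ≤ mass) :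
    number_of_peptides_with_mass_alt mass in_data = pvW (PySem.Set.ofList in_data) mass.toNat := by
  simp only [number_of_peptides_with_mass_alt]
  rw [if_neg (by omega)]
  have hm : mass = ((mass.toNat : Nat) : Int) := by omega
  rw [hm, pvWaysInv (PySem.Set.ofList in_data) mass.toNat, PySem.List.pyGet?_natCast]
  simp [List.getElem?_range, Nat.lt_succ_self]
  congr 1
  omega

-- ===== A-side =====
def pvSumI (S : List Int) (mass : Int) (l : List (Int × Int)) : Int :=
  (l.map (fun p => p.2 * pvC S (mass - p.1))).sum

theorem pvSum_flatMap {α β : Type} (l : List α) (g : α → List β) (f : β → Int) :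
    ((l.flatMap g).map f).sum = (l.map (fun a => ((g a).map f).sum)).sum := by
  induction l with
  | nil => simp
  | cons p l ih => simp [List.flatMap_cons, ih]

theorem pvSumI_filter (S : List Int) (mass : Int) (q : Int × Int → Bool) (l : List (Int × Int))
    (hq : ∀ p ∈ l, q p = false → pvC S (mass - p.1) = 0) :
    pvSumI S mass (l.filter q) = pvSumI S mass l := by
  unfold pvSumI
  rw [pvSum_filter_map]
  apply congrArg
  apply List.map_eq_map_iff.mpr
  intro p hp
  by_cases h : q p
  · simp [h]
  · simp only [Bool.not_eq_true] at h
    simp [h, hq p hp h]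

theorem pvGetD_foldl_insert_add {α : Type} (key : α → Int) (amt : α → Int) (l : List α)
    (t : PySem.Dict Int Int) (v : Int) :
    (l.foldl (fun t p => t.insert (key p) (t.getD (key p) 0 + amt p)) t).getD v 0
      = t.getD v 0 + ((l.filter (fun p => key p == v)).map amt).sum := by
  induction l generalizing t with
  | nil => simp
  | cons p l ih =>
    rw [List.foldl_cons, ih]
    by_cases h : key p = v
    · rw [List.filter_cons_of_pos (by simp [h]), List.map_cons, List.sum_cons]
      subst h
      rw [PySem.Dict.getD_insert_self]
      ring
    · rw [List.filter_cons_of_neg (by simp [h]), PySem.Dict.getD_insert,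
        if_neg (fun hh => h hh.symm)]

-- one iteration of A's while-loop, seen through pvSumI
theorem pvStep (S : List Int) (hS : S.Nodup) (hpos : ∀ d ∈ S, 1 ≤ d) (mass : Int)
    (sources : PySem.Dict Int Int) (hnd : sources.keys.Nodup) (out0 : Int) :
    let pairs := sources.keys.flatMap (fun k => S.map (fun d => (k, d)))
    let targets := pairs.foldl
      (fun t p => t.insert (p.1 + p.2) (t.getD (p.1 + p.2) 0 + sources.getD p.1 1))
      PySem.Dict.empty
    let targets' := if targets.contains mass then targets.erase mass else targets
    let sources' := (targets'.items.filter (fun p => decide (p.1 ≤ mass))).foldl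
      (fun d p => d.insert p.1 p.2) PySem.Dict.empty
    sources'.keys.Nodup
    ∧ (∀ k' ∈ sources'.keys, (∃ k0 ∈ sources.keys, ∃ d0 ∈ S, k' = k0 + d0) ∧ k' ≤ mass)
    ∧ (if targets.contains mass then out0 + targets.getD mass 0 else out0)
        + pvSumI S mass sources'.items = out0 + pvSumI S mass sources.items := by
  intro pairs targets targets' sources'
  have hkey : targets.keys = PySem.Set.ofList (pairs.map (fun p => p.1 + p.2)) := by
    rw [show targets = pairs.foldl (fun t p => t.insert (p.1 + p.2) (t.getD (p.1 + p.2) 0 + sources.getD p.1 1)) PySem.Dict.empty from rfl,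
      PySem.Dict.keys_foldl_insert_key pairs (fun p => p.1 + p.2)
        (fun t p => t.getD (p.1 + p.2) 0 + sources.getD p.1 1) PySem.Dict.empty]
    simp [PySem.Set.update_nil_left]
  have hknd : targets.keys.Nodup := by rw [hkey]; exact PySem.Set.nodup_ofList _
  have hT : ∀ v : Int, targets.getD v 0
      = ((pairs.filter (fun p => p.1 + p.2 == v)).map (fun p => sources.getD p.1 1)).sum := by
    intro v
    rw [show targets = pairs.foldl (fun t p => t.insert (p.1 + p.2) (t.getD (p.1 + p.2) 0 + sources.getD p.1 1)) PySem.Dict.empty from rfl,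
      pvGetD_foldl_insert_add (fun p => p.1 + p.2) (fun p => sources.getD p.1 1) pairs PySem.Dict.empty v]
    simp
  -- sources' is exactly the filtered item list
  have h1 : targets'.items.Sublist targets.items := by
    show (if targets.contains mass then targets.erase mass else targets).items.Sublist targets.items
    split
    · exact List.filter_sublist
    · exact List.Sublist.refl _
  have hfnd : ((targets'.items.filter (fun p => decide (p.1 ≤ mass))).map Prod.fst).Nodup :=
    List.Nodup.sublist ((List.filter_sublist.trans h1).map Prod.fst) hknd
  have hitems : sources'.items = targets'.items.filter (fun p => decide (p.1 ≤ mass)) := by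
    rw [show sources' = (targets'.items.filter (fun p => decide (p.1 ≤ mass))).foldl
        (fun d p => d.insert p.1 p.2) PySem.Dict.empty from rfl,
      PySem.Dict.items_foldl_insert_fresh _ Prod.fst Prod.snd PySem.Dict.empty
        (fun a _ => by simp) hfnd]
    simp [show PySem.Dict.empty.items = ([] : List (Int × Int)) from rfl]
  refine ⟨?_, ?_, ?_⟩
  · show (sources'.items.map Prod.fst).Nodup
    rw [hitems]; exact hfnd
  · intro k' hk'
    have hk2 : k' ∈ targets.keys := by
      have : k' ∈ sources'.items.map Prod.fst := hk'
      rw [hitems] at this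
      simp only [List.mem_map] at this
      obtain ⟨p, hp, rfl⟩ := this
      have hp2 : p ∈ targets.items := h1.mem (List.mem_filter.mp hp).1
      exact List.mem_map_of_mem hp2
    constructor
    · rw [hkey] at hk2
      rw [PySem.Set.mem_ofList] at hk2
      simp only [List.mem_map] at hk2
      obtain ⟨p, hp, rfl⟩ := hk2
      have : p.1 ∈ sources.keys ∧ p.2 ∈ S := by
        have := List.mem_flatMap.mp hp
        obtain ⟨k0, hk0, hmem⟩ := this
        simp only [List.mem_map] at hmem
        obtain ⟨d0, hd0, rfl⟩ := hmem
        exact ⟨hk0, hd0⟩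
      exact ⟨p.1, this.1, p.2, this.2, rfl⟩
    · have : k' ∈ sources'.items.map Prod.fst := hk'
      rw [hitems] at this
      simp only [List.mem_map] at this
      obtain ⟨p, hp, rfl⟩ := this
      have := (List.mem_filter.mp hp).2
      simpa using this
  · -- the sum equation
    have hdrop : pvSumI S mass sources'.items = pvSumI S mass targets.items := by
      rw [hitems]
      by_cases h : targets.contains mass
      · show pvSumI S mass ((if targets.contains mass then targets.erase mass else targets).items.filter _) = _
        rw [if_pos h]
        rw [show (targets.erase mass).items = targets.items.filter (fun p => !(p.1 == mass)) from rfl]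
        rw [pvSumI_filter S mass _ _ (by
          intro p _ hqp
          simp only [decide_eq_false_iff_not, not_le] at hqp
          have h0 : mass - p.1 ≤ 0 := by omega
          simp [pvC, h0])]
        rw [pvSumI_filter S mass _ _ (by
          intro p _ hqp
          simp only [Bool.not_eq_false', beq_iff_eq] at hqp
          have h0 : mass - p.1 ≤ 0 := by omega
          simp [pvC, h0])]
      · show pvSumI S mass ((if targets.contains mass then targets.erase mass else targets).items.filter _) = _
        rw [if_neg h]
        rw [pvSumI_filter S mass _ _ (by
          intro p _ hqp
          simp only [decide_eq_false_iff_not, not_le] at hqp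
          have h0 : mass - p.1 ≤ 0 := by omega
          simp [pvC, h0])]
    have hpop : (if targets.contains mass then out0 + targets.getD mass 0 else out0)
        = out0 + ((pairs.filter (fun p => p.1 + p.2 == mass)).map (fun p => sources.getD p.1 1)).sum := by
      by_cases h : targets.contains mass
      · rw [if_pos h, hT mass]
      · rw [if_neg h]
        have hnomem : mass ∉ targets.keys := fun hm =>
          (by simpa [PySem.Dict.contains_iff_mem_keys] using h : ¬ mass ∈ targets.keys) hm
        have : pairs.filter (fun p => p.1 + p.2 == mass) = [] := by
          rw [List.filter_eq_nil_iff]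
          intro p hp hcon
          apply hnomem
          rw [hkey, PySem.Set.mem_ofList]
          simp only [beq_iff_eq] at hcon
          exact hcon ▸ List.mem_map_of_mem hp
        rw [this]
        simp
    rw [hdrop, hpop]
    -- main rearrangement: T mass + Σ_targets = Σ_sources
    have hmain : ((pairs.filter (fun p => p.1 + p.2 == mass)).map (fun p => sources.getD p.1 1)).sum
        + pvSumI S mass targets.items = pvSumI S mass sources.items := by
      have h1 : pvSumI S mass targets.items
          = (pairs.map (fun p => sources.getD p.1 1 * pvC S (mass - (p.1 + p.2)))).sum := by
        rw [pvSumI, PySem.Dict.items_eq_map_keys targets hknd 0, List.map_map]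
        have h2 : ∀ t ∈ targets.keys,
            ((fun p => p.2 * pvC S (mass - p.1)) ∘ fun k => (k, targets.getD k 0)) t
            = ((pairs.filter (fun p => p.1 + p.2 == t)).map
                (fun p => sources.getD p.1 1 * pvC S (mass - (p.1 + p.2)))).sum := by
          intro t _
          simp only [Function.comp_def]
          rw [hT t, ← List.sum_map_mul_right]
          apply congrArg
          apply List.map_eq_map_iff.mpr
          intro p hp
          have := (List.mem_filter.mp hp).2
          simp only [beq_iff_eq] at this
          rw [this]
        rw [List.map_eq_map_iff.mpr h2]
        exact pvSum_partition (fun p => p.1 + p.2) _ targets.keys hknd pairs (by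
          intro p hp
          rw [hkey, PySem.Set.mem_ofList]
          exact List.mem_map_of_mem hp)
      rw [h1, pvSum_filter_map, ← PySem.List.sum_map_add_int]
      -- now everything is one sum over pairs; regroup through the flatMap
      rw [show pairs = sources.keys.flatMap (fun k => S.map (fun d => (k, d))) from rfl]
      rw [pvSum_flatMap, pvSumI, PySem.Dict.items_eq_map_keys sources hnd 1, List.map_map]
      apply congrArg
      apply List.map_eq_map_iff.mpr
      intro k _
      simp only [List.map_map, Function.comp_def]
      have hinner : ∀ d ∈ S,
          ((if (k + d == mass) = true then sources.getD k 1 else 0)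
            + sources.getD k 1 * pvC S (mass - (k + d)))
          = sources.getD k 1 * ((if d = mass - k then 1 else 0) + pvC S ((mass - k) - d)) := by
        intro d _
        have harg : mass - (k + d) = (mass - k) - d := by ring
        rw [harg]
        by_cases h : k + d = mass
        · rw [if_pos (by simpa using h), if_pos (by omega)]
          ring
        · rw [if_neg (by simpa using h), if_neg (by omega)]
          ring
      rw [List.map_eq_map_iff.mpr hinner, List.sum_map_mul_left]
      apply congrArg
      rw [PySem.List.sum_map_add_int S (fun d => if d = mass - k then (1 : Int) else 0)
        (fun d => pvC S ((mass - k) - d))]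
      rw [pvSum_indicator S hS (mass - k) 1, ← pvC_rec S hS hpos (mass - k)]
    omega

-- the loop, once all keys are ≤ mass, just accumulates pvSumI
theorem pvLoop (S : List Int) (hS : S.Nodup) (hpos : ∀ d ∈ S, 1 ≤ d) (mass : Int) :
    ∀ (fuel : Nat) (sources : PySem.Dict Int Int) (out : Int), sources.keys.Nodup →
    (∀ k ∈ sources.keys, mass - fuel < k ∧ k ≤ mass) →
    pvALoop mass S fuel sources out = out + pvSumI S mass sources.items := by
  intro fuel
  induction fuel with
  | zero =>
    intro sources out _ hbnd
    have hkeys : sources.keys = [] := by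
      rw [List.eq_nil_iff_forall_not_mem]
      intro k hk
      have := hbnd k hk
      omega
    have hit : sources.items = [] := by
      have := congrArg List.length hkeys
      simp only [PySem.Dict.keys, List.length_map, List.length_nil] at this
      exact List.eq_nil_of_length_eq_zero this
    rw [pvALoop, hit]
    simp [pvSumI]
  | succ fuel ih =>
    intro sources out hnd hbnd
    rw [pvALoop]
    by_cases hemp : sources.items.isEmpty
    · rw [if_pos hemp]
      rw [List.isEmpty_iff.mp hemp]
      simp [pvSumI]
    · rw [if_neg hemp]
      have hstep := pvStep S hS hpos mass sources hnd out
      simp only at hstep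
      obtain ⟨hnd', hbnd', hsum⟩ := hstep
      rw [ih _ _ hnd' (by
        intro k' hk'
        obtain ⟨⟨k0, hk0, d0, hd0, rfl⟩, hle⟩ := hbnd' k' hk'
        have h1 := (hbnd k0 hk0).1
        have h2 := hpos d0 hd0
        constructor
        · omega
        · exact hle)]
      omega

theorem pvLoopTop (S : List Int) (hS : S.Nodup) (hpos : ∀ d ∈ S, 1 ≤ d) (mass : Int)
    (fuel : Nat) (sources : PySem.Dict Int Int) (out : Int) (hnd : sources.keys.Nodup)
    (hbnd : ∀ k ∈ sources.keys, mass - (fuel + 1) < k) :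
    pvALoop mass S (fuel + 1) sources out = out + pvSumI S mass sources.items := by
  rw [pvALoop]
  by_cases hemp : sources.items.isEmpty
  · rw [if_pos hemp, List.isEmpty_iff.mp hemp]
    simp [pvSumI]
  · rw [if_neg hemp]
    have hstep := pvStep S hS hpos mass sources hnd out
    simp only at hstep
    obtain ⟨hnd', hbnd', hsum⟩ := hstep
    rw [pvLoop S hS hpos mass fuel _ _ hnd' (by
      intro k' hk'
      obtain ⟨⟨k0, hk0, d0, hd0, rfl⟩, hle⟩ := hbnd' k' hk'
      have h1 := hbnd k0 hk0
      have h2 := hpos d0 hd0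
      exact ⟨by omega, hle⟩)]
    omega

theorem pvA_eq (mass : Int) (in_data : List Int) (hpos : ∀ d ∈ in_data, 1 ≤ d) :
    number_of_peptides_with_mass mass in_data
      = pvC (PySem.Set.ofList in_data) mass - (if mass ∈ PySem.Set.ofList in_data then 1 else 0) := by
  have hS : (PySem.Set.ofList in_data).Nodup := PySem.Set.nodup_ofList _
  have hpos' : ∀ d ∈ PySem.Set.ofList in_data, 1 ≤ d := by
    intro d hd
    exact hpos d ((PySem.Set.mem_ofList _ _).mp hd)
  set S := PySem.Set.ofList in_data with hSdef
  -- initial dict {k:1 for k in data}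
  have hinit : (S.foldl (fun d k => d.insert k (1 : Int)) PySem.Dict.empty).items
      = S.map (fun k => (k, (1 : Int))) := by
    rw [PySem.Dict.items_foldl_insert_fresh S (fun k => k) (fun _ => (1 : Int)) PySem.Dict.empty
      (fun a _ => by simp) (by simpa using hS)]
    simp [show PySem.Dict.empty.items = ([] : List (Int × Int)) from rfl]
  have hinitk : (S.foldl (fun d k => d.insert k (1 : Int)) PySem.Dict.empty).keys = S := by
    show ((S.foldl (fun d k => d.insert k (1 : Int)) PySem.Dict.empty).items.map Prod.fst) = S
    rw [hinit, List.map_map]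
    simp [Function.comp_def]
  have hsum0 : pvSumI S mass (S.foldl (fun d k => d.insert k (1 : Int)) PySem.Dict.empty).items
      = (S.map (fun d => pvC S (mass - d))).sum := by
    rw [hinit, pvSumI, List.map_map]
    simp [Function.comp_def]
  have hgoal : number_of_peptides_with_mass mass in_data
      = (S.map (fun d => pvC S (mass - d))).sum := by
    simp only [number_of_peptides_with_mass, ← hSdef]
    rw [show mass.toNat + 2 = (mass.toNat + 1) + 1 from rfl]
    rw [pvLoopTop S hS hpos' mass (mass.toNat + 1) _ 0 (by rw [hinitk]; exact hS)
      (by rw [hinitk]; intro k hk; have := hpos' k hk; omega)]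
    rw [hsum0]
    ring
  rw [hgoal]
  have h := pvC_rec S hS hpos' mass
  rw [h]
  ring

-- ===== VERDICT (by name: the statement is the Claim_ definition above) =====
theorem number_of_peptides_with_mass_spec : Claim_unchanged_number_of_peptides_with_mass := by
  intro mass in_data _ hpre hnd
  have hnd' : mass ≠ 0 ∧ mass ∉ in_data := by
    unfold D_number_of_peptides_with_mass at hnd
    tauto
  have hnotS : mass ∉ PySem.Set.ofList in_data :=
    fun h => hnd'.2 ((PySem.Set.mem_ofList _ _).mp h)
  rw [pvA_eq mass in_data hpre, if_neg hnotS]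
  by_cases hm : mass < 0
  · rw [show number_of_peptides_with_mass_alt mass in_data = 0 from by
      simp only [number_of_peptides_with_mass_alt]; rw [if_pos hm]]
    rw [pvC, if_pos (by omega)]
    ring
  · rw [pvAlt_eq mass in_data (by omega), pvC, if_neg (by omega)]
    ring

theorem number_of_peptides_with_mass_changed : Claim_changed_number_of_peptides_with_mass := by
  unfold Claim_changed_number_of_peptides_with_mass; decide

theorem number_of_peptides_with_mass_tight : Claim_exact_number_of_peptides_with_mass := by
  unfold Claim_exact_number_of_peptides_with_mass
  intro mass in_data _ hpre hd
  have hA := pvA_eq mass in_data hpre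
  rcases hd with h0 | hmem
  · subst h0
    rw [hA, pvAlt_eq 0 in_data (le_refl 0)]
    have h0S : (0 : Int) ∉ PySem.Set.ofList in_data := fun h => by
      have := hpre 0 ((PySem.Set.mem_ofList _ _).mp h)
      omega
    rw [if_neg h0S, pvC, if_pos (le_refl 0)]
    have h1 : pvW (PySem.Set.ofList in_data) (0 : Int).toNat = 1 := by
      rw [pvW]
      simp
    omega
  · have hm1 : 1 ≤ mass := hpre mass hmem
    have hS : mass ∈ PySem.Set.ofList in_data := (PySem.Set.mem_ofList _ _).mpr hmem
    rw [hA, pvAlt_eq mass in_data (by omega), if_pos hS, pvC, if_neg (by omega)]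
    omega
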